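-- pv_equiv track=rewrite | github.com/blackmamba22/python | project_euler/euler.py | square_of_sum
-- ===== SOURCE A (Python) =====
-- def square_of_sum(x, y):
-- 	"""Returns the square of the sum of numbers x through y inclusive."""
--
-- 	if not isinstance(x, int) or not isinstance(y, int):
-- 		raise ValueError('Please enter integer values.')
--
-- 	x_to_y = list(range(x, y+1))
-- 	sum = 0
--
-- 	for n in x_to_y:
-- 		sum+= n
--
-- 	return (sum**2)
-- ===== SOURCE B (Python) =====
-- def square_of_sum(x, y):
--     """Returns the square of the sum of numbers x through y inclusive."""
--     if not isinstance(x, int) or not isinstance(y, int):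
--         raise ValueError('Please enter integer values.')
--     s = (x + y) * (y - x + 1) // 2 if x <= y else 0
--     return s * s
-- ===== Notes on version B (the rewrite author's own statement) =====
-- stated objective: faster
-- what changed: Replaces building list(range(x,y+1)) and summing it in a loop with the arithmetic-series closed form (x+y)*(y-x+1)//2, squared.
import Mathlib
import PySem

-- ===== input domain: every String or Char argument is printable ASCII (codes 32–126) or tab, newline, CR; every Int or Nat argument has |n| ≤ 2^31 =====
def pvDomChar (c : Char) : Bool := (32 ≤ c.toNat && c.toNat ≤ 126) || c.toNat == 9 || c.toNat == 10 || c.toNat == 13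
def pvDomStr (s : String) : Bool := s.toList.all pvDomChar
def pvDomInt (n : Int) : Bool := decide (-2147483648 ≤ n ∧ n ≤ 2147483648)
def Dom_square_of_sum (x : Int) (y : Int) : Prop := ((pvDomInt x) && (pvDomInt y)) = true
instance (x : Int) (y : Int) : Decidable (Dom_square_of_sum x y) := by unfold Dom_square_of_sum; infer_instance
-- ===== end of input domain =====

-- B replaces A's list-building summation loop with the O(1) arithmetic-series closed form.

-- ===== PORT A =====
-- x_to_y = list(range(x, y+1)); sum = 0; for n in x_to_y: sum += n; return sum**2
def square_of_sum (x : Int) (y : Int) : Int :=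
  let x_to_y := PySem.List.pyRange x (y + 1) 1
  let sum := x_to_y.foldl (fun s n => s + n) 0
  sum ^ 2

-- ===== PORT B =====
-- s = (x + y) * (y - x + 1) // 2 if x <= y else 0; return s * s
def square_of_sum_alt (x : Int) (y : Int) : Int :=
  let s := if x ≤ y then PySem.Int.floordiv ((x + y) * (y - x + 1)) 2 else 0
  s * s

-- ===== PRECONDITION & SPEC =====
def Spec_square_of_sum (x : Int) (y : Int) (out : Int) : Prop := out = square_of_sum_alt x y
instance (x : Int) (y : Int) (out : Int) : Decidable (Spec_square_of_sum x y out) := by unfold Spec_square_of_sum; infer_instance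

-- ===== CLAIM (what is proved, stated in full; the proofs are below) =====
def Claim_equal_square_of_sum : Prop := ∀ (x : Int) (y : Int), Dom_square_of_sum x y → Spec_square_of_sum x y (square_of_sum x y)

-- ===== LEMMAS AND PROOFS =====

-- shifting the foldl accumulator
theorem pv_foldl_shift (l : List Int) (b c : Int) :
    l.foldl (fun s m => s + m) (b + c) = l.foldl (fun s m => s + m) b + c := by
  induction l generalizing b with
  | nil => simp
  | cons h t iht => simp only [List.foldl_cons]; rw [show b + c + h = b + h + c by ring, iht]

-- doubled sum over [a, a+1, …, a+n-1]
theorem pv_sum_range (n : Nat) (a : Int) :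
    2 * (PySem.List.pyRange a (a + n) 1).foldl (fun s m => s + m) 0
      = (n : Int) * (2 * a + n - 1) := by
  induction n with
  | zero => rw [PySem.List.pyRange_one_eq_nil (by simp)]; simp
  | succ n ih =>
    have h1 : a + ((n : Int) + 1) = (a + n) + 1 := by ring
    push_cast
    rw [h1, PySem.List.pyRange_one_succ_right (by omega), List.foldl_append]
    simp only [List.foldl_cons, List.foldl_nil]
    rw [show (PySem.List.pyRange a (a + ↑n) 1).foldl (fun s m => s + m) 0 + (a + ↑n)
          = (PySem.List.pyRange a (a + ↑n) 1).foldl (fun s m => s + m) (0 + (a + ↑n)) by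
        rw [pv_foldl_shift]]
    rw [pv_foldl_shift]
    linarith [ih]

theorem pv_sum_closed (x y : Int) (h : x ≤ y) :
    (PySem.List.pyRange x (y + 1) 1).foldl (fun s n => s + n) 0
      = PySem.Int.floordiv ((x + y) * (y - x + 1)) 2 := by
  have hn : y + 1 = x + ((y + 1 - x).toNat : Int) := by omega
  have h2 := pv_sum_range (y + 1 - x).toNat x
  rw [← hn] at h2
  have hc : ((y + 1 - x).toNat : Int) = y + 1 - x := by omega
  rw [hc] at h2
  have hprod : (x + y) * (y - x + 1)
      = 2 * (PySem.List.pyRange x (y + 1) 1).foldl (fun s n => s + n) 0 := by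
    rw [show (fun (s n : Int) => s + n) = (fun s m => s + m) from rfl, h2]; ring
  rw [hprod, PySem.Int.floordiv, Int.mul_fdiv_cancel_left _ (by norm_num)]

-- ===== VERDICT (by name: the statement is the Claim_ definition above) =====
theorem square_of_sum_spec : Claim_equal_square_of_sum := by
  intro x y _
  unfold Spec_square_of_sum square_of_sum square_of_sum_alt
  by_cases h : x ≤ y
  · simp only [if_pos h]
    rw [pv_sum_closed x y h]; ring
  · simp only [if_neg h]
    rw [PySem.List.pyRange_one_eq_nil (by omega)]
    simp
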